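-- pv_equiv track=rewrite | github.com/IAPOLINARIO/100-days-of-code | Month-1/Week-1/day-03/py2/main.py | findVeggies
-- ===== SOURCE A (Python) =====
-- def findVeggies(grill):
--   veggie, nonVeggie = 0, 0
--   for skewer in grill.split():
--     if 'x' not in skewer:
--       veggie+=1
--     else:
--       nonVeggie+=1
--   return [veggie, nonVeggie]
-- ===== SOURCE B (Python) =====
-- def findVeggies(grill):
--   veggie, nonVeggie = 0, 0
--   in_word, has_x = False, False
--   for ch in grill:
--     if ch.isspace():
--       if in_word:
--         if has_x:
--           nonVeggie += 1
--         else: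
--           veggie += 1
--       in_word, has_x = False, False
--     else:
--       in_word = True
--       if ch == 'x':
--         has_x = True
--   if in_word:
--     if has_x:
--       nonVeggie += 1
--     else:
--       veggie += 1
--   return [veggie, nonVeggie]
-- ===== Notes on version B (the rewrite author's own statement) =====
-- stated objective: alternative
-- what changed: B never calls split() and never materialises a token list or does substring tests: it runs a character-level finite-state machine over the raw string (tracking in_word and has_x flags) and commits a counter at each word boundary.
import Mathlib
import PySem

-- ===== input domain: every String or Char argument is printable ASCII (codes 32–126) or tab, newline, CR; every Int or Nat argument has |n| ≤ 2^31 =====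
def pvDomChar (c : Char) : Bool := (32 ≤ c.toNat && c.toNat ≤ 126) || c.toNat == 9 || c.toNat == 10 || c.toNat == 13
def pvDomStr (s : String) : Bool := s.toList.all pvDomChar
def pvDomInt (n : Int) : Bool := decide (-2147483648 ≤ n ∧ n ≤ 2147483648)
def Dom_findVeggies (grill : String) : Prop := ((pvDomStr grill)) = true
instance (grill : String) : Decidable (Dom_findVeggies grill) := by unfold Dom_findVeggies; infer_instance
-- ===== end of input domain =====

-- B replaces split()-plus-substring-tests by a single character-level state
-- machine (in_word / has_x flags, counters committed at word boundaries);
-- objective: alternative (same cost, no token list ever built).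

-- ===== PORT A =====
def findVeggies (grill : String) : List Int :=
  let p := (PySem.Str.split₀ grill).foldl
    (fun (s : Int × Int) skewer =>
      if ¬ PySem.Str.isIn "x" skewer then (s.1 + 1, s.2) else (s.1, s.2 + 1))
    (0, 0)
  [p.1, p.2]

-- ===== PORT B =====
-- state = (veggie, nonVeggie, in_word, has_x); one step of the loop body of Source B
def fvStep (s : Int × Int × Bool × Bool) (c : Char) : Int × Int × Bool × Bool :=
  if PySem.Chars.isspace c then
    if s.2.2.1 then
      if s.2.2.2 then (s.1, s.2.1 + 1, false, false) else (s.1 + 1, s.2.1, false, false)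
    else (s.1, s.2.1, false, false)
  else (s.1, s.2.1, true, s.2.2.2 || (c == 'x'))

-- the trailing `if in_word:` flush after Source B's loop
def fvFlush (s : Int × Int × Bool × Bool) : Int × Int :=
  if s.2.2.1 then
    if s.2.2.2 then (s.1, s.2.1 + 1) else (s.1 + 1, s.2.1)
  else (s.1, s.2.1)

def findVeggies_alt (grill : String) : List Int :=
  let p := fvFlush (grill.toList.foldl fvStep (0, 0, false, false))
  [p.1, p.2]

-- ===== PRECONDITION & SPEC =====
def Spec_findVeggies (grill : String) (out : List Int) : Prop := out = findVeggies_alt grill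
instance (grill : String) (out : List Int) : Decidable (Spec_findVeggies grill out) := by unfold Spec_findVeggies; infer_instance

-- ===== CLAIM (what is proved, stated in full; the proofs are below) =====
def Claim_equal_findVeggies : Prop := ∀ (grill : String), Dom_findVeggies grill → Spec_findVeggies grill (findVeggies grill)

-- ===== LEMMAS AND PROOFS =====

-- 'x' in w (substring of length 1) is just membership
theorem pv_isIn_x (w : List Char) :
    PySem.Chars.isIn ['x'] w = decide ('x' ∈ w) := by
  by_cases h : 'x' ∈ w
  · have hinf : ['x'] <:+: w := by
      obtain ⟨s, t, rfl⟩ := List.mem_iff_append.mp h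
      exact ⟨s, t, by simp⟩
    simp [h, (PySem.Chars.isIn_iff_infix _ _).mpr hinf]
  · have hinf : ¬ ['x'] <:+: w := fun hi => h (hi.subset (by simp))
    simp [h, (PySem.Chars.isIn_eq_false_iff _ _).mpr hinf]

-- split₀.go with a nonempty accumulator just prepends it
theorem pv_go_acc (l cur : List Char) (acc : List (List Char)) :
    PySem.Chars.split₀.go l cur acc = acc.reverse ++ PySem.Chars.split₀.go l cur [] := by
  induction l generalizing cur acc with
  | nil =>
    by_cases h : cur.isEmpty <;> simp [PySem.Chars.split₀.go, h]
  | cons c rest ih =>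
    by_cases hs : PySem.Chars.isspace c
    · by_cases h : cur.isEmpty
      · simp only [PySem.Chars.split₀.go, hs, h, if_true]
        exact ih [] acc
      · simp only [PySem.Chars.split₀.go, hs, h, if_true, if_false, Bool.false_eq_true]
        rw [ih, ih ([]) [cur.reverse]]
        simp
    · simp only [PySem.Chars.split₀.go, hs, Bool.false_eq_true, if_false]
      exact ih _ _

-- the per-word pair fold of A, as countP (as in the A port, over List Char words)
theorem pv_fold_pair {α : Type} (q : α → Bool) (l : List α) (a b : Int) :
    l.foldl (fun (s : Int × Int) e =>
      if ¬ q e then (s.1 + 1, s.2) else (s.1, s.2 + 1)) (a, b)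
    = (a + (l.countP (fun e => !q e) : Int), b + (l.countP q : Int)) := by
  induction l generalizing a b with
  | nil => simp
  | cons x xs ih =>
    rw [List.foldl_cons]
    by_cases h : q x = true
    · rw [if_neg (not_not_intro h), ih]; simp [h, Prod.ext_iff]; omega
    · rw [if_pos h, ih]; simp [h, Prod.ext_iff]; omega

-- the FSM invariant: folding fvStep over l from state (v, nv, cur ≠ [], 'x' ∈ cur)
-- and flushing counts exactly the words produced by split₀.go l cur []
theorem pv_fsm (l : List Char) (cur : List Char) (v nv : Int) :
    fvFlush (l.foldl fvStep (v, nv, !cur.isEmpty, decide ('x' ∈ cur)))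
    = (v + ((PySem.Chars.split₀.go l cur []).countP (fun w => !PySem.Chars.isIn ['x'] w) : Int),
       nv + ((PySem.Chars.split₀.go l cur []).countP (fun w => PySem.Chars.isIn ['x'] w) : Int)) := by
  induction l generalizing cur v nv with
  | nil =>
    by_cases h : cur.isEmpty
    · simp [PySem.Chars.split₀.go, h, fvFlush]
    · by_cases hx : 'x' ∈ cur <;>
        simp [PySem.Chars.split₀.go, h, fvFlush, hx, pv_isIn_x]
  | cons c rest ih =>
    by_cases hs : PySem.Chars.isspace c
    · by_cases h : cur.isEmpty
      · have hc : cur = [] := by simpa using h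
        subst hc
        simp only [PySem.Chars.split₀.go, hs, if_true, List.foldl_cons]
        have := ih ([]) v nv
        simpa [fvStep, hs] using this
      · simp only [PySem.Chars.split₀.go, hs, h, if_true, if_false, Bool.false_eq_true, List.foldl_cons]
        rw [pv_go_acc rest [] [cur.reverse]]
        by_cases hx : 'x' ∈ cur
        · have := ih ([]) v (nv + 1)
          simp only [fvStep, hs, if_true, hx] at this ⊢
          simp at this ⊢
          rw [this]
          simp [pv_isIn_x, hx, Prod.ext_iff]
          omega
        · have := ih ([]) (v + 1) nv
          simp only [fvStep, hs, if_true, hx] at this ⊢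
          simp at this ⊢
          rw [this]
          simp [pv_isIn_x, hx, Prod.ext_iff]
          omega
    · simp only [PySem.Chars.split₀.go, hs, Bool.false_eq_true, if_false, List.foldl_cons]
      have := ih (c :: cur) v nv
      simp only [List.isEmpty_cons, Bool.not_false] at this
      rw [← this]
      have hb : (decide ('x' ∈ c :: cur)) = (decide ('x' ∈ cur) || (c == 'x')) := by
        by_cases hc : c = 'x'
        · subst hc; simp
        · have h1 : ¬ 'x' = c := fun h => hc h.symm
          simp [List.mem_cons, hc, h1]
      rw [hb]
      congr 1
      simp [fvStep, hs]

-- ===== VERDICT (by name: the statement is the Claim_ definition above) =====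
theorem findVeggies_spec : Claim_equal_findVeggies := by
  intro grill _
  show findVeggies grill = findVeggies_alt grill
  have hA : findVeggies grill
      = [((PySem.Str.split₀ grill).foldl
            (fun (s : Int × Int) skewer =>
              if ¬ PySem.Str.isIn "x" skewer then (s.1 + 1, s.2) else (s.1, s.2 + 1)) (0, 0)).1,
         ((PySem.Str.split₀ grill).foldl
            (fun (s : Int × Int) skewer =>
              if ¬ PySem.Str.isIn "x" skewer then (s.1 + 1, s.2) else (s.1, s.2 + 1)) (0, 0)).2] := rfl
  have hB : findVeggies_alt grill
      = [(fvFlush (grill.toList.foldl fvStep (0, 0, false, false))).1,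
         (fvFlush (grill.toList.foldl fvStep (0, 0, false, false))).2] := rfl
  rw [hA, hB, pv_fold_pair]
  have hfsm := pv_fsm grill.toList [] 0 0
  simp only [List.isEmpty_nil, Bool.not_true, List.not_mem_nil,
    decide_false] at hfsm
  rw [hfsm]
  simp only [PySem.Str.split₀, PySem.Chars.split₀, List.countP_map]
  have h1 : List.countP ((fun e => !PySem.Str.isIn "x" e) ∘ String.ofList)
      (PySem.Chars.split₀.go grill.toList [] [])
      = List.countP (fun w => !PySem.Chars.isIn ['x'] w) (PySem.Chars.split₀.go grill.toList [] []) := by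
    apply List.countP_congr; intro w _; simp [Function.comp, PySem.Str.isIn]
  have h2 : List.countP ((fun e => PySem.Str.isIn "x" e) ∘ String.ofList)
      (PySem.Chars.split₀.go grill.toList [] [])
      = List.countP (fun w => PySem.Chars.isIn ['x'] w) (PySem.Chars.split₀.go grill.toList [] []) := by
    apply List.countP_congr; intro w _; simp [Function.comp, PySem.Str.isIn]
  simp only [h1, h2]
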